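-- pv_equiv track=rewrite | github.com/Dem1Good1/DG1 | 9zadanie.py | find_max_in_rows_and_min_in_columns
-- ===== SOURCE A (Python) =====
-- def find_max_in_rows_and_min_in_columns(matrix):
--     n = len(matrix)
--     max_in_rows = [max(row) for row in matrix]
--
--     min_in_columns = []
--     for j in range(n):
--         col = [matrix[i][j] for i in range(n)]
--         min_in_columns.append(min(col))
--
--     return max_in_rows, min_in_columns
-- ===== SOURCE B (Python) =====
-- def find_max_in_rows_and_min_in_columns(matrix):
--     if not matrix:
--         return [], []
--     max_in_rows = [max(row) for row in matrix]
--     min_in_columns = [matrix[0][j] for j in range(len(matrix))]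
--     for row in matrix[1:]:
--         min_in_columns = [min(m, x) for m, x in zip(min_in_columns, row)]
--     return max_in_rows, min_in_columns
-- ===== Notes on version B (the rewrite author's own statement) =====
-- stated objective: alternative
-- what changed: Column minima are computed in a single pass over the rows with a running pointwise-minimum vector (zip + min), instead of A's per-column reconstruction of each column as a list followed by min; Pre_ excludes only inputs where A raises (a row shorter than len(matrix): ValueError on an empty row or IndexError on column access).
import Mathlib
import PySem

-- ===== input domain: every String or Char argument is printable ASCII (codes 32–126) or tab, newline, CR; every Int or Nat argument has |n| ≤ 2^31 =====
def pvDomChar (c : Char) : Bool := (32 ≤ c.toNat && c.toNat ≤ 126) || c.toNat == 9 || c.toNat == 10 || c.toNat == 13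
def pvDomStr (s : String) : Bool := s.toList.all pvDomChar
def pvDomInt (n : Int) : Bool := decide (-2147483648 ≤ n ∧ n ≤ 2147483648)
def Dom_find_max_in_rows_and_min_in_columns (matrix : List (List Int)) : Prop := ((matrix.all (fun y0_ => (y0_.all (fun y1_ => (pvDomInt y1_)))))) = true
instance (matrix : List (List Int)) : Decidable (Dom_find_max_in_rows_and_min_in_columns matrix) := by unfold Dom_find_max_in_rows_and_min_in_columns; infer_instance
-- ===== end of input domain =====

-- B computes the column minima in a single pass over the rows with a running pointwise-minimum
-- vector, instead of A's per-column reconstruction of each column as a list followed by min.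
-- Neither version mutates its argument; equivalence is about the return value.

-- ===== PORT A =====
-- max(row)/min(col) raise ValueError on empty input and matrix[i][j] raises IndexError out of
-- range; Pre_ excludes those inputs, so the .getD 0 defaults are never the returned value there.
def find_max_in_rows_and_min_in_columns (matrix : List (List Int)) : List Int × List Int :=
  let n : Int := matrix.length
  let max_in_rows : List Int := matrix.map (fun row => (PySem.List.max? row (fun x => x)).getD 0)
  let min_in_columns : List Int :=
    (PySem.List.pyRange 0 n 1).foldl (fun acc j =>
      let col : List Int := (PySem.List.pyRange 0 n 1).map (fun i =>
        (((PySem.List.pyGet? matrix i).bind (fun row => PySem.List.pyGet? row j)).getD 0))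
      acc ++ [(PySem.List.min? col (fun x => x)).getD 0]) []
  (max_in_rows, min_in_columns)

-- ===== PORT B =====
-- min_in_columns = [min(m, x) for m, x in zip(min_in_columns, row)]
def pvPointMin (ms row : List Int) : List Int :=
  (ms.zip row).map (fun p => min p.1 p.2)

def find_max_in_rows_and_min_in_columns_alt (matrix : List (List Int)) : List Int × List Int :=
  if matrix = [] then ([], [])
  else
    let max_in_rows : List Int := matrix.map (fun row => (PySem.List.max? row (fun x => x)).getD 0)
    let mins0 : List Int := (List.range matrix.length).map (fun (j : Nat) =>
      (((PySem.List.pyGet? matrix 0).bind (fun r => PySem.List.pyGet? r (j : Int))).getD 0))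
    let min_in_columns : List Int := (matrix.drop 1).foldl pvPointMin mins0
    (max_in_rows, min_in_columns)

-- ===== PRECONDITION & SPEC =====
-- Pre_ excludes exactly the inputs on which A raises: a row shorter than len(matrix) makes
-- matrix[i][j] raise IndexError (and an empty row in a nonempty matrix makes max(row) raise
-- ValueError; such a row is also shorter than len(matrix)).
def Pre_find_max_in_rows_and_min_in_columns (matrix : List (List Int)) : Prop :=
  ∀ row ∈ matrix, matrix.length ≤ row.length

instance (matrix : List (List Int)) : Decidable (Pre_find_max_in_rows_and_min_in_columns matrix) := by
  unfold Pre_find_max_in_rows_and_min_in_columns; infer_instance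

def pvWitness_find_max_in_rows_and_min_in_columns : List (List Int) := [[1, 5], [3, -2]]

def Spec_find_max_in_rows_and_min_in_columns (matrix : List (List Int)) (out : List Int × List Int) : Prop := out = find_max_in_rows_and_min_in_columns_alt matrix
instance (matrix : List (List Int)) (out : List Int × List Int) : Decidable (Spec_find_max_in_rows_and_min_in_columns matrix out) := by unfold Spec_find_max_in_rows_and_min_in_columns; infer_instance

-- ===== CLAIM (what is proved, stated in full; the proofs are below) =====
def Claim_equal_find_max_in_rows_and_min_in_columns : Prop := ∀ (matrix : List (List Int)), Dom_find_max_in_rows_and_min_in_columns matrix → Pre_find_max_in_rows_and_min_in_columns matrix → Spec_find_max_in_rows_and_min_in_columns matrix (find_max_in_rows_and_min_in_columns matrix)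

-- ===== LEMMAS AND PROOFS =====

theorem pvPointMin_length (ms row : List Int) :
    (pvPointMin ms row).length = min ms.length row.length := by
  simp [pvPointMin]

theorem pvPointMin_getD (ms row : List Int) (j : Nat) (hj : j < ms.length)
    (hj2 : j < row.length) :
    (pvPointMin ms row).getD j 0 = min (ms.getD j 0) (row.getD j 0) := by
  unfold pvPointMin
  have hlen : j < (ms.zip row).length := by simp [List.length_zip]; omega
  rw [List.getD_eq_getElem?_getD, List.getElem?_map, List.getElem?_eq_getElem hlen]
  simp only [Option.map_some, Option.getD_some, List.getElem_zip]
  rw [List.getD_eq_getElem?_getD, List.getD_eq_getElem?_getD,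
    List.getElem?_eq_getElem hj, List.getElem?_eq_getElem hj2]
  rfl

-- the running pointwise-min fold, characterized column-by-column
theorem pvMins_char (rows : List (List Int)) (n : Nat) (acc : List Int)
    (hacc : acc.length = n) (hrows : ∀ row ∈ rows, n ≤ row.length) :
    rows.foldl pvPointMin acc
      = (List.range n).map (fun j =>
          rows.foldl (fun a row => min a (row.getD j 0)) (acc.getD j 0)) := by
  induction rows generalizing acc with
  | nil =>
    simp only [List.foldl_nil]
    apply List.ext_getElem
    · simp [hacc]
    · intro i h1 _
      simp [List.getD_eq_getElem?_getD, List.getElem?_eq_getElem h1]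
  | cons r rs ih =>
    have hr : n ≤ r.length := hrows r (by simp)
    have hlen : (pvPointMin acc r).length = n := by
      rw [pvPointMin_length, hacc]; omega
    rw [List.foldl_cons, ih _ hlen (fun row hm => hrows row (by simp [hm]))]
    apply List.map_congr_left
    intro j hj
    simp only [List.mem_range] at hj
    simp only [List.foldl_cons]
    congr 1
    exact pvPointMin_getD acc r j (by omega) (by omega)

theorem pvColA (matrix : List (List Int)) (hP : ∀ row ∈ matrix, matrix.length ≤ row.length)
    (j : Nat) (hj : j < matrix.length) :
    (List.range matrix.length).map (fun i : Nat =>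
        (((PySem.List.pyGet? matrix (i : Int)).bind (fun row => PySem.List.pyGet? row (j : Int))).getD 0))
      = matrix.map (fun row => row.getD j 0) := by
  apply List.ext_getElem
  · simp
  · intro i h1 h2
    simp only [List.length_map, List.length_range] at h1
    simp only [List.getElem_map, List.getElem_range]
    have h1' : i < matrix.length := h1
    rw [PySem.List.pyGet?_natCast, List.getElem?_eq_getElem h1']
    have hji : j < matrix[i].length := lt_of_lt_of_le hj (hP _ (List.getElem_mem h1'))
    simp only [Option.bind_some]
    rw [PySem.List.pyGet?_natCast, List.getElem?_eq_getElem hji]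
    simp [List.getD_eq_getElem?_getD, List.getElem?_eq_getElem hji]

-- B's initial vector is row 0 restricted to the first n columns
theorem pvMins0_getD (r0 : List Int) (rs : List (List Int)) (j : Nat)
    (hj : j < (r0 :: rs).length) (hr0 : (r0 :: rs).length ≤ r0.length) :
    ((List.range (r0 :: rs).length).map (fun (j : Nat) =>
      (((PySem.List.pyGet? (r0 :: rs) 0).bind (fun r => PySem.List.pyGet? r (j : Int))).getD 0))).getD j 0
      = r0.getD j 0 := by
  rw [List.getD_eq_getElem?_getD, List.getElem?_map,
    List.getElem?_range (by simpa using hj)]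
  simp only [Option.map_some, Option.getD_some]
  have h0 : PySem.List.pyGet? (r0 :: rs) (0 : Int) = some r0 := by
    simp [PySem.List.pyGet?, PySem.List.pyIdx?]
  rw [h0]
  have hjr : j < r0.length := lt_of_lt_of_le hj hr0
  rw [Option.bind_some, PySem.List.pyGet?_natCast, List.getElem?_eq_getElem hjr]
  simp [List.getD_eq_getElem?_getD, List.getElem?_eq_getElem hjr]

-- ===== VERDICT (by name: the statement is the Claim_ definition above) =====
theorem find_max_in_rows_and_min_in_columns_spec : Claim_equal_find_max_in_rows_and_min_in_columns := by
  intro matrix _ hP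
  unfold Spec_find_max_in_rows_and_min_in_columns
  unfold find_max_in_rows_and_min_in_columns find_max_in_rows_and_min_in_columns_alt
  cases matrix with
  | nil => simp
  | cons r0 rs =>
    have hP' : ∀ row ∈ (r0 :: rs), (r0 :: rs).length ≤ row.length := hP
    have hr0 : (r0 :: rs).length ≤ r0.length := hP' r0 (by simp)
    rw [if_neg (by simp)]
    simp only
    rw [Prod.mk.injEq]
    refine ⟨rfl, ?_⟩
    -- min side
    rw [PySem.List.foldl_append_singleton_eq_map, List.nil_append, List.drop_one, List.tail_cons]
    rw [pvMins_char rs (r0 :: rs).length _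
      (by simp) (fun row hm => hP' row (by simp [hm]))]
    rw [PySem.List.pyRange_one]
    simp only [sub_zero, Int.toNat_natCast, List.map_map]
    apply List.map_congr_left
    intro j hj
    simp only [List.mem_range] at hj
    simp only [Function.comp_def, zero_add]
    rw [pvColA (r0 :: rs) hP' j hj]
    rw [List.map_cons, PySem.List.min?_id_cons]
    simp only [Option.getD_some]
    rw [List.foldl_map, pvMins0_getD r0 rs j hj hr0]
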